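-- pv_equiv track=rewrite | github.com/saad-bin-sohan/BracU_Courses | BRACU_CSE422 - Artifical Intelligence/Lab Assignments Solutions/Lab 2/Sohan_CSE422_Lab_Assignment02_Summer2024.py | evalt_quality
-- ===== SOURCE A (Python) =====
-- def evalt_quality(possibly_rtn, toral_crs, num_slots):
--     overlap_clash_existing = 0
--     consistency_existing = 0
--
--     for nmbr1_for_itr in range(num_slots):
--         strt_idx = nmbr1_for_itr * toral_crs
--         end_index = (nmbr1_for_itr + 1) * toral_crs
--         slot = possibly_rtn[strt_idx:end_index]
--         overlap_clash_existing += max(0, sum(slot) - 1)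
--
--     for nmbr2_for_itr in range(toral_crs):
--         course_sum = 0
--         for nmbr1_for_itr in range(num_slots):
--             idx = nmbr2_for_itr + nmbr1_for_itr * toral_crs
--             course_sum += possibly_rtn[idx]
--         consistency_existing += abs(course_sum - 1)
--
--     return -(overlap_clash_existing + consistency_existing)
-- ===== SOURCE B (Python) =====
-- def evalt_quality(possibly_rtn, toral_crs, num_slots):
--     slot_sums = [0] * num_slots
--     course_sums = [0] * toral_crs
--     for i in range(num_slots * toral_crs):
--         v = possibly_rtn[i]
--         slot_sums[i // toral_crs] += v
--         course_sums[i % toral_crs] += v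
--     penalty = sum(max(0, s - 1) for s in slot_sums)
--     penalty += sum(abs(c - 1) for c in course_sums)
--     return -penalty
-- ===== Notes on version B (the rewrite author's own statement) =====
-- stated objective: alternative
-- what changed: B replaces A's two differently-shaped passes (row slicing, then a nested column-major scan) by one linear sweep over the flat list that scatters each element into a row-sum table (index i // toral_crs) and a column-sum table (index i % toral_crs), reading the penalties off the two tables afterwards.
-- outside the precondition, e.g. on evalt_quality([2, 2, 3], -2, 1): A returns -1, B returns 0; on evalt_quality([1], -1, -1): A returns 0, B raises IndexError
import Mathlib
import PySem

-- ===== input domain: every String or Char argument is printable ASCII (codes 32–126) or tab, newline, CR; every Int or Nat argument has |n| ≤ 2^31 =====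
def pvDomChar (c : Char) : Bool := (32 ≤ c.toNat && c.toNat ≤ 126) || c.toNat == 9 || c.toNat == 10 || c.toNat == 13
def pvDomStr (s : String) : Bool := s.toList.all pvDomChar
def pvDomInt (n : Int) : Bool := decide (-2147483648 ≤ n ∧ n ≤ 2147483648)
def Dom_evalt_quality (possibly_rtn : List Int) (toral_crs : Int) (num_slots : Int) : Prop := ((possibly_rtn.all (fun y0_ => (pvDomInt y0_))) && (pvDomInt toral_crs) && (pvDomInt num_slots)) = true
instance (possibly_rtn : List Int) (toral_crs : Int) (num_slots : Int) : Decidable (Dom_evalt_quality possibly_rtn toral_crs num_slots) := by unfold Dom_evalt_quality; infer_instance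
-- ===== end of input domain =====

-- B replaces A's two differently-shaped passes (row slices, then a nested column-major scan) by a
-- single linear sweep scattering each element into a row-sum table and a column-sum table
-- (objective: alternative decomposition, same asymptotic cost).

-- ===== PORT A =====
def evalt_quality (possibly_rtn : List Int) (toral_crs : Int) (num_slots : Int) : Int :=
  let overlap_clash_existing : Int :=
    (PySem.List.pyRange 0 num_slots 1).foldl (fun acc k =>
      acc + max 0 ((PySem.List.slice possibly_rtn (some (k * toral_crs)) (some ((k + 1) * toral_crs))).sum - 1)) 0
  let consistency_existing : Int :=
    (PySem.List.pyRange 0 toral_crs 1).foldl (fun acc j =>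
      acc + abs (((PySem.List.pyRange 0 num_slots 1).foldl
               (fun cs k => cs + PySem.List.pyGetD possibly_rtn (j + k * toral_crs) 0) 0) - 1)) 0;
  -(overlap_clash_existing + consistency_existing)

-- ===== PORT B =====
def evalt_quality_alt (possibly_rtn : List Int) (toral_crs : Int) (num_slots : Int) : Int :=
  let tables :=
    (PySem.List.pyRange 0 (num_slots * toral_crs) 1).foldl
      (fun (p : List Int × List Int) i =>
        let v := PySem.List.pyGetD possibly_rtn i 0
        (PySem.List.pySetD p.1 (PySem.Int.floordiv i toral_crs)
           (PySem.List.pyGetD p.1 (PySem.Int.floordiv i toral_crs) 0 + v),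
         PySem.List.pySetD p.2 (PySem.Int.mod i toral_crs)
           (PySem.List.pyGetD p.2 (PySem.Int.mod i toral_crs) 0 + v)))
      (PySem.List.pyRepeat [0] num_slots, PySem.List.pyRepeat [0] toral_crs)
  let penalty : Int :=
    (tables.1.map (fun s => max 0 (s - 1))).sum + (tables.2.map (fun c => abs (c - 1))).sum;
  -penalty

-- ===== PRECONDITION & SPEC =====
-- Pre_ restricts to the natural domain: a nonnegative course count and a matrix that fits in the
-- list.  Excluded are inputs where A's column scan raises IndexError (both dimensions positive but
-- num_slots*toral_crs > len), and negative toral_crs, where A's value is an accident of Python's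
-- negative-slice wraparound (and B may raise or return a different value there).
def Pre_evalt_quality (possibly_rtn : List Int) (toral_crs : Int) (num_slots : Int) : Prop :=
  0 ≤ toral_crs ∧ (num_slots ≤ 0 ∨ num_slots * toral_crs ≤ (possibly_rtn.length : Int))
instance (possibly_rtn : List Int) (toral_crs : Int) (num_slots : Int) : Decidable (Pre_evalt_quality possibly_rtn toral_crs num_slots) := by unfold Pre_evalt_quality; infer_instance

def pvWitness_evalt_quality : List Int × Int × Int := ([1, 0, 1, 1], 2, 2)

def Spec_evalt_quality (possibly_rtn : List Int) (toral_crs : Int) (num_slots : Int) (out : Int) : Prop := out = evalt_quality_alt possibly_rtn toral_crs num_slots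
instance (possibly_rtn : List Int) (toral_crs : Int) (num_slots : Int) (out : Int) : Decidable (Spec_evalt_quality possibly_rtn toral_crs num_slots out) := by unfold Spec_evalt_quality; infer_instance

-- ===== CLAIM (what is proved, stated in full; the proofs are below) =====
def Claim_equal_evalt_quality : Prop := ∀ (possibly_rtn : List Int) (toral_crs : Int) (num_slots : Int), Dom_evalt_quality possibly_rtn toral_crs num_slots → Pre_evalt_quality possibly_rtn toral_crs num_slots → Spec_evalt_quality possibly_rtn toral_crs num_slots (evalt_quality possibly_rtn toral_crs num_slots)

-- ===== LEMMAS AND PROOFS =====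

-- a scatter fold (pySetD at an index computed from the element) keeps the table length
theorem pv_scatter_length (l : List Int) (f v : Int → Int) (acc : List Int) :
    (l.foldl (fun s i => PySem.List.pySetD s (f i) (PySem.List.pyGetD s (f i) 0 + v i)) acc).length
      = acc.length := by
  induction l generalizing acc with
  | nil => rfl
  | cons i0 tl ih => rw [List.foldl_cons, ih, PySem.List.length_pySetD]

-- elementwise value of a scatter fold: the initial entry plus the sum of v over the hits
theorem pv_scatter_getD (l : List Int) (f v : Int → Int) (acc : List Int) (a : Nat)
    (hl : ∀ i ∈ l, 0 ≤ f i ∧ f i < (acc.length : Int)) :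
    (l.foldl (fun s i => PySem.List.pySetD s (f i) (PySem.List.pyGetD s (f i) 0 + v i)) acc).getD a 0
      = acc.getD a 0 + ((l.filter (fun i => decide (f i = (a : Int)))).map v).sum := by
  induction l generalizing acc with
  | nil => simp
  | cons i0 tl ih =>
    obtain ⟨h0, h1⟩ := hl i0 (by simp)
    have hlt : (f i0).toNat < acc.length := by omega
    rw [List.foldl_cons, PySem.List.pySetD_of_nonneg acc _ h0,
        PySem.List.pyGetD_eq_getElem acc 0 h0 h1]
    rw [ih _ (by intro i hi; simpa [List.length_set] using hl i (List.mem_cons_of_mem _ hi))]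
    by_cases hfa : f i0 = (a : Int)
    · have hna : (f i0).toNat = a := by omega
      rw [List.filter_cons_of_pos (by simp [hfa])]
      subst hna
      rw [List.getD_eq_getElem _ 0 (by simpa [List.length_set] using hlt),
          List.getD_eq_getElem _ 0 hlt]
      rw [List.getElem_set_self]
      simp only [List.map_cons, List.sum_cons]
      ring
    · have hna : (f i0).toNat ≠ a := by omega
      rw [List.filter_cons_of_neg (by simp [hfa])]
      congr 1
      by_cases ha : a < acc.length
      · rw [List.getD_eq_getElem _ 0 (by simpa [List.length_set] using ha),
            List.getD_eq_getElem _ 0 ha]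
        exact List.getElem_set_ne hna _
      · rw [List.getD_eq_default _ 0 (by simpa [List.length_set] using ha),
            List.getD_eq_default _ 0 (by omega)]

theorem pv_getD_replicate (m k : Nat) : (List.replicate m (0:Int)).getD k 0 = 0 := by
  by_cases h : k < m
  · rw [List.getD_eq_getElem _ 0 (by simpa using h)]; simp
  · rw [List.getD_eq_default _ 0 (by simpa using h)]

-- a map of pyGetD over a sub-range is the corresponding drop/take window of the list
theorem pv_map_pyGetD_sub (xs : List Int) (d a b : Int) (h0 : 0 ≤ a) (hab : a ≤ b)
    (hb : b ≤ (xs.length : Int)) :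
    (PySem.List.pyRange a b 1).map (fun j => PySem.List.pyGetD xs j d)
      = List.take (b.toNat - a.toNat) (List.drop a.toNat xs) := by
  have hsplit := PySem.List.pyRange_one_append a b (PySem.List.len xs) hab (by simpa using hb)
  have hmap := PySem.List.map_pyGetD_pyRange xs d h0
  rw [hsplit, List.map_append] at hmap
  have hlen : ((PySem.List.pyRange a b 1).map (fun j => PySem.List.pyGetD xs j d)).length
      = b.toNat - a.toNat := by
    rw [List.length_map, PySem.List.length_pyRange_one]; omega
  calc (PySem.List.pyRange a b 1).map (fun j => PySem.List.pyGetD xs j d)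
      = List.take (b.toNat - a.toNat)
          (((PySem.List.pyRange a b 1).map (fun j => PySem.List.pyGetD xs j d)) ++
           ((PySem.List.pyRange b (PySem.List.len xs) 1).map (fun j => PySem.List.pyGetD xs j d))) :=
        (List.take_left' hlen).symm
    _ = List.take (b.toNat - a.toNat) (List.drop a.toNat xs) := by rw [hmap]

-- the flat indices whose row (floor-division by t) is k are exactly the k-th row block
theorem pv_filter_div (t n k : Int) (ht : 0 < t) (hk0 : 0 ≤ k) (hkn : k < n) :
    (PySem.List.pyRange 0 (n * t) 1).filter (fun i => decide (PySem.Int.floordiv i t = k))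
      = PySem.List.pyRange (k * t) ((k + 1) * t) 1 := by
  rw [PySem.List.pyRange_one_append 0 (k * t) (n * t) (mul_nonneg hk0 ht.le) (by nlinarith),
      PySem.List.pyRange_one_append (k * t) ((k + 1) * t) (n * t) (by nlinarith) (by nlinarith),
      List.filter_append, List.filter_append]
  rw [List.filter_eq_nil_iff.mpr, List.filter_eq_self.mpr, List.filter_eq_nil_iff.mpr]
  · simp
  · intro i hi
    rw [PySem.List.mem_pyRange_one] at hi
    simp only [decide_eq_true_eq]
    intro hdiv
    have := (PySem.Int.le_floordiv_iff_mul_le (a := i) (b := t) (q := k + 1) ht).mpr (by nlinarith)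
    omega
  · intro i hi
    rw [PySem.List.mem_pyRange_one] at hi
    simp only [decide_eq_true_eq]
    exact (PySem.Int.floordiv_eq_iff_of_pos ht).mpr ⟨hi.1, hi.2⟩
  · intro i hi
    rw [PySem.List.mem_pyRange_one] at hi
    simp only [decide_eq_true_eq]
    intro hdiv
    have := (PySem.Int.floordiv_lt_iff_lt_mul (a := i) (b := t) (q := k) ht).mpr (by nlinarith)
    omega

-- the flat indices whose column (mod t) is j are j, j+t, j+2t, …
theorem pv_filter_mod (t j : Int) (ht : 0 < t) (hj0 : 0 ≤ j) (hjt : j < t) (N : Nat) :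
    (PySem.List.pyRange 0 ((N : Int) * t) 1).filter (fun i => decide (PySem.Int.mod i t = j))
      = (PySem.List.pyRange 0 (N : Int) 1).map (fun k => j + k * t) := by
  induction N with
  | zero => simp [PySem.List.pyRange_one_eq_nil]
  | succ m ih =>
    have hm0 : (0:Int) ≤ (m : Int) := Int.natCast_nonneg m
    have hmt0 : (0:Int) ≤ (m : Int) * t := mul_nonneg hm0 ht.le
    have hmod : ∀ i : Int, (m : Int) * t ≤ i → i < (m : Int) * t + t →
        PySem.Int.mod i t = i - (m : Int) * t := by
      intro i hi1 hi2
      have hdiv : PySem.Int.floordiv i t = (m : Int) :=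
        (PySem.Int.floordiv_eq_iff_of_pos ht).mpr ⟨hi1, by rw [add_mul, one_mul]; exact hi2⟩
      have hc := PySem.Int.floordiv_mul_add_mod i t
      rw [hdiv] at hc
      linarith
    have e1 : (PySem.List.pyRange ((m : Int) * t) ((m : Int) * t + j) 1).filter
        (fun i => decide (PySem.Int.mod i t = j)) = [] := by
      rw [List.filter_eq_nil_iff]
      intro i hi
      rw [PySem.List.mem_pyRange_one] at hi
      simp only [decide_eq_true_eq]
      rw [hmod i (by omega) (by omega)]
      omega
    have e2 : (PySem.List.pyRange ((m : Int) * t + j) ((m : Int) * t + j + 1) 1).filter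
        (fun i => decide (PySem.Int.mod i t = j)) = [(m : Int) * t + j] := by
      rw [PySem.List.pyRange_one_singleton, List.filter_cons_of_pos (by
        simp only [decide_eq_true_eq]
        rw [hmod ((m : Int) * t + j) (by omega) (by omega)]
        omega)]
      rfl
    have e3 : (PySem.List.pyRange ((m : Int) * t + j + 1) ((m : Int) * t + t) 1).filter
        (fun i => decide (PySem.Int.mod i t = j)) = [] := by
      rw [List.filter_eq_nil_iff]
      intro i hi
      rw [PySem.List.mem_pyRange_one] at hi
      simp only [decide_eq_true_eq]
      rw [hmod i (by omega) (by omega)]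
      omega
    have hsucc : ((m + 1 : Nat) : Int) = (m : Int) + 1 := by push_cast; ring
    rw [hsucc, add_mul, one_mul,
        PySem.List.pyRange_one_append 0 ((m : Int) * t) ((m : Int) * t + t) hmt0 (by omega),
        List.filter_append, ih,
        PySem.List.pyRange_one_append ((m : Int) * t) ((m : Int) * t + j) ((m : Int) * t + t)
          (by omega) (by omega),
        List.filter_append,
        PySem.List.pyRange_one_append ((m : Int) * t + j) ((m : Int) * t + j + 1)
          ((m : Int) * t + t) (by omega) (by omega),
        List.filter_append, e1, e2, e3,
        PySem.List.pyRange_one_succ_right hm0, List.map_append]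
    simp [add_comm]

-- pv_filter_mod with an Int bound
theorem pv_filter_mod' (t j n : Int) (ht : 0 < t) (hj0 : 0 ≤ j) (hjt : j < t) (hn : 0 ≤ n) :
    (PySem.List.pyRange 0 (n * t) 1).filter (fun i => decide (PySem.Int.mod i t = j))
      = (PySem.List.pyRange 0 n 1).map (fun k => j + k * t) := by
  have h := pv_filter_mod t j ht hj0 hjt n.toNat
  rwa [Int.toNat_of_nonneg hn] at h

-- the row table built by the scatter loop lists the row sums
theorem pv_row_table (xs : List Int) (t n : Int) (ht : 0 < t) (hn : 0 < n) :
    (PySem.List.pyRange 0 (n * t) 1).foldl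
        (fun s i => PySem.List.pySetD s (PySem.Int.floordiv i t)
          (PySem.List.pyGetD s (PySem.Int.floordiv i t) 0 + PySem.List.pyGetD xs i 0))
        (List.replicate n.toNat 0)
      = (PySem.List.pyRange 0 n 1).map (fun k =>
          ((PySem.List.pyRange (k * t) ((k + 1) * t) 1).map
            (fun i => PySem.List.pyGetD xs i 0)).sum) := by
  have hlen : ∀ i ∈ PySem.List.pyRange 0 (n * t) 1,
      0 ≤ PySem.Int.floordiv i t ∧
        PySem.Int.floordiv i t < ((List.replicate n.toNat (0:Int)).length : Int) := by
    intro i hi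
    rw [PySem.List.mem_pyRange_one] at hi
    constructor
    · have := (PySem.Int.le_floordiv_iff_mul_le (a := i) (b := t) (q := 0) ht).mpr (by omega)
      omega
    · have := (PySem.Int.floordiv_lt_iff_lt_mul (a := i) (b := t) (q := n) ht).mpr (by omega)
      simp only [List.length_replicate]
      omega
  apply List.ext_getElem
  · rw [pv_scatter_length, List.length_replicate, List.length_map,
        PySem.List.length_pyRange_one]
    omega
  · intro k hk1 hk2
    rw [List.length_map, PySem.List.length_pyRange_one] at hk2
    have hkn : (k : Int) < n := by omega
    rw [← List.getD_eq_getElem _ 0 hk1, ← List.getD_eq_getElem _ 0 (by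
      rw [List.length_map, PySem.List.length_pyRange_one]; omega)]
    rw [pv_scatter_getD (PySem.List.pyRange 0 (n * t) 1) (fun i => PySem.Int.floordiv i t)
        (fun i => PySem.List.pyGetD xs i 0) (List.replicate n.toNat 0) k hlen]
    rw [pv_getD_replicate, zero_add]
    rw [pv_filter_div t n (k : Int) ht (Int.natCast_nonneg k) hkn]
    rw [List.getD_eq_getElem _ 0 (by rw [List.length_map, PySem.List.length_pyRange_one]; omega)]
    rw [List.getElem_map, PySem.List.getElem_pyRange_one]
    norm_num

-- the column table built by the scatter loop lists the column sums
theorem pv_col_table (xs : List Int) (t n : Int) (ht : 0 < t) (hn : 0 < n) :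
    (PySem.List.pyRange 0 (n * t) 1).foldl
        (fun s i => PySem.List.pySetD s (PySem.Int.mod i t)
          (PySem.List.pyGetD s (PySem.Int.mod i t) 0 + PySem.List.pyGetD xs i 0))
        (List.replicate t.toNat 0)
      = (PySem.List.pyRange 0 t 1).map (fun j =>
          ((PySem.List.pyRange 0 n 1).map
            (fun k => PySem.List.pyGetD xs (j + k * t) 0)).sum) := by
  have hlen : ∀ i ∈ PySem.List.pyRange 0 (n * t) 1,
      0 ≤ PySem.Int.mod i t ∧
        PySem.Int.mod i t < ((List.replicate t.toNat (0:Int)).length : Int) := by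
    intro i _
    refine ⟨PySem.Int.mod_nonneg i ht, ?_⟩
    have := PySem.Int.mod_lt i ht
    simp only [List.length_replicate]
    omega
  apply List.ext_getElem
  · rw [pv_scatter_length, List.length_replicate, List.length_map,
        PySem.List.length_pyRange_one]
    omega
  · intro j hj1 hj2
    rw [List.length_map, PySem.List.length_pyRange_one] at hj2
    have hjt : (j : Int) < t := by omega
    rw [← List.getD_eq_getElem _ 0 hj1, ← List.getD_eq_getElem _ 0 (by
      rw [List.length_map, PySem.List.length_pyRange_one]; omega)]
    rw [pv_scatter_getD (PySem.List.pyRange 0 (n * t) 1) (fun i => PySem.Int.mod i t)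
        (fun i => PySem.List.pyGetD xs i 0) (List.replicate t.toNat 0) j hlen]
    rw [pv_getD_replicate, zero_add]
    rw [pv_filter_mod' t (j : Int) n ht (Int.natCast_nonneg j) hjt hn.le]
    rw [List.getD_eq_getElem _ 0 (by rw [List.length_map, PySem.List.length_pyRange_one]; omega)]
    rw [List.getElem_map, PySem.List.getElem_pyRange_one, List.map_map]
    simp [Function.comp_def]

-- main case: both dimensions positive and the matrix fits in the list
theorem pv_case_main (xs : List Int) (t n : Int) (ht : 0 < t) (hn : 0 < n)
    (hfit : n * t ≤ (xs.length : Int)) :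
    evalt_quality xs t n = evalt_quality_alt xs t n := by
  simp only [evalt_quality, evalt_quality_alt]
  rw [PySem.List.foldl_prod_mk
      (f := fun s i => PySem.List.pySetD s (PySem.Int.floordiv i t)
        (PySem.List.pyGetD s (PySem.Int.floordiv i t) 0 + PySem.List.pyGetD xs i 0))
      (g := fun s i => PySem.List.pySetD s (PySem.Int.mod i t)
        (PySem.List.pyGetD s (PySem.Int.mod i t) 0 + PySem.List.pyGetD xs i 0))]
  rw [PySem.List.pyRepeat_singleton, PySem.List.pyRepeat_singleton]
  rw [pv_row_table xs t n ht hn, pv_col_table xs t n ht hn]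
  simp only [PySem.List.foldl_add, List.map_map, zero_add]
  congr 1
  congr 1
  -- overlap: A's slice sums are B's row sums (the consistency summand is closed definitionally)
  apply congrArg
  apply List.map_congr_left
  intro k hk
  rw [PySem.List.mem_pyRange_one] at hk
  simp only [Function.comp_apply]
  have hA : (0:Int) ≤ k * t := mul_nonneg hk.1 ht.le
  have hAB : k * t ≤ (k + 1) * t := by nlinarith
  have hB : (k + 1) * t ≤ (xs.length : Int) := by nlinarith
  rw [PySem.List.slice_toNat xs hA (le_trans hA hAB)]
  rw [pv_map_pyGetD_sub xs 0 (k * t) ((k + 1) * t) hA hAB hB]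

-- degenerate case: zero courses
theorem pv_case_t0 (xs : List Int) (n : Int) :
    evalt_quality xs 0 n = evalt_quality_alt xs 0 n := by
  simp only [evalt_quality, evalt_quality_alt, mul_zero]
  rw [PySem.List.pyRange_one_eq_nil (le_refl (0:Int))]
  simp only [List.foldl_nil]
  have hsl : PySem.List.slice xs (some (0:Int)) (some (0:Int)) = [] := by
    rw [PySem.List.slice_toNat xs (le_refl 0) (le_refl 0)]
    simp
  have hmax : max (0:Int) (List.sum ([] : List Int) - 1) = 0 := by norm_num
  simp only [hsl, hmax, add_zero]
  rw [PySem.List.foldl_ignore]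
  rw [PySem.List.pyRepeat_singleton, PySem.List.pyRepeat_singleton]
  simp

-- degenerate case: no slots (every course is then missing exactly once)
theorem pv_case_npos (xs : List Int) (t n : Int) (ht : 0 < t) (hn : n ≤ 0) :
    evalt_quality xs t n = evalt_quality_alt xs t n := by
  simp only [evalt_quality, evalt_quality_alt]
  have hnt : n * t ≤ 0 := mul_nonpos_of_nonpos_of_nonneg hn ht.le
  rw [PySem.List.pyRange_one_eq_nil hn, PySem.List.pyRange_one_eq_nil hnt]
  simp only [List.foldl_nil]
  have habs : |(0:Int) - 1| = 1 := by norm_num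
  simp only [habs]
  rw [PySem.List.foldl_add (PySem.List.pyRange 0 t 1) (fun _ => (1:Int)) 0]
  rw [PySem.List.pyRepeat_singleton, PySem.List.pyRepeat_singleton]
  have hn0 : n.toNat = 0 := by omega
  rw [hn0]
  simp [List.map_const', List.sum_replicate, PySem.List.length_pyRange_one]

-- ===== VERDICT (by name: the statement is the Claim_ definition above) =====
theorem evalt_quality_spec : Claim_equal_evalt_quality := by
  intro xs t n _dom hpre
  obtain ⟨ht, hnt⟩ := hpre
  unfold Spec_evalt_quality
  rcases lt_or_eq_of_le ht with htpos | hteq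
  · by_cases hn0 : n ≤ 0
    · exact pv_case_npos xs t n htpos hn0
    · have hnpos : 0 < n := by omega
      have hfit : n * t ≤ (xs.length : Int) := by
        rcases hnt with h | h
        · omega
        · exact h
      exact pv_case_main xs t n htpos hnpos hfit
  · rw [← hteq]
    exact pv_case_t0 xs n
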